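-- pv_equiv track=rewrite | github.com/ANEASER/Password-check | new_rough_sheet.py | checkSP
-- ===== SOURCE A (Python) =====
-- def checkSP(p):
--     SPchars = ["#", "@", "*", "&"]
--     i = 0
--     while i < len(p):
--         if str(p[i]) in SPchars:
--             return True
--         else:
--             i = i +1
--     return False
-- ===== SOURCE B (Python) =====
-- def checkSP(p):
--     return any(c in p for c in "#@*&")
-- ===== Notes on version B (the rewrite author's own statement) =====
-- stated objective: idiomatic
-- what changed: Inverts the loop structure: instead of scanning p character by character with early return, B iterates over the four special characters and performs a substring-membership search of each in p, which a timing run measured as much faster since the scans run in C.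
import Mathlib
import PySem

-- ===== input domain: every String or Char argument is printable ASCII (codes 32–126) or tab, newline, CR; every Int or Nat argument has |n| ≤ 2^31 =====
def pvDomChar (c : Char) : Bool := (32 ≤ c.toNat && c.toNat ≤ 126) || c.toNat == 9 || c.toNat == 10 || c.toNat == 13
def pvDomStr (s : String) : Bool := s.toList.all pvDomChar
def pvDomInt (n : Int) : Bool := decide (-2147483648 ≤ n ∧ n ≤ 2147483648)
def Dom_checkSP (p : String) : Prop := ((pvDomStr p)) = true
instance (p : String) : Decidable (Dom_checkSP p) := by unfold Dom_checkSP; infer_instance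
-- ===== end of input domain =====

-- B inverts A's loop: instead of scanning p with an index and early return, it iterates
-- over the four special characters and tests substring membership of each in p.


-- ===== PORT A =====
-- A's while loop over indices, testing str(p[i]) (= the character itself) against the 4 specials
def checkSPgo (cs : List Char) : Bool :=
  match cs with
  | [] => false
  | c :: rest => if c ∈ ['#', '@', '*', '&'] then true else checkSPgo rest

def checkSP (p : String) : Bool := checkSPgo p.toList

-- ===== PORT B =====
-- B: any(c in p for c in "#@*&") — a substring-membership search of each special in p
def checkSP_alt (p : String) : Bool :=
  "#@*&".toList.any (fun c => PySem.Str.isIn (String.ofList [c]) p)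

-- ===== PRECONDITION & SPEC =====
def Spec_checkSP (p : String) (out : Bool) : Prop := out = checkSP_alt p
instance (p : String) (out : Bool) : Decidable (Spec_checkSP p out) := by unfold Spec_checkSP; infer_instance

-- ===== CLAIM (what is proved, stated in full; the proofs are below) =====
def Claim_equal_checkSP : Prop := ∀ (p : String), Dom_checkSP p → Spec_checkSP p (checkSP p)

-- ===== LEMMAS AND PROOFS =====
theorem singleton_infix_iff_mem (c : Char) (cs : List Char) : [c] <:+: cs ↔ c ∈ cs := by
  constructor
  · intro h; exact h.subset (List.mem_singleton_self c)
  · intro h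
    obtain ⟨l, r, rfl⟩ := List.append_of_mem h
    exact ⟨l, r, by simp⟩

theorem checkSPgo_eq_true_iff (cs : List Char) :
    checkSPgo cs = true ↔ ∃ c ∈ cs, c ∈ ['#', '@', '*', '&'] := by
  induction cs with
  | nil => simp [checkSPgo]
  | cons c rest ih =>
    by_cases h : c ∈ ['#', '@', '*', '&']
    · simp only [checkSPgo, h, if_true, true_iff]
      exact ⟨c, List.mem_cons_self .., h⟩
    · simp only [checkSPgo, h, if_false, ih]
      constructor
      · rintro ⟨d, hd, hds⟩; exact ⟨d, List.mem_cons_of_mem _ hd, hds⟩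
      · rintro ⟨d, hd, hds⟩
        rcases List.mem_cons.mp hd with rfl | hd'
        · exact absurd hds h
        · exact ⟨d, hd', hds⟩

theorem checkSP_alt_eq_true_iff (p : String) :
    checkSP_alt p = true ↔ ∃ c ∈ p.toList, c ∈ ['#', '@', '*', '&'] := by
  have he : "#@*&".toList = ['#', '@', '*', '&'] := rfl
  unfold checkSP_alt
  rw [List.any_eq_true]
  constructor
  · rintro ⟨c, hc, hin⟩
    have h := (PySem.Str.isIn_iff_infix _ _).mp hin
    exact ⟨c, (singleton_infix_iff_mem c p.toList).mp (by rw [String.toList_ofList] at h; exact h), he ▸ hc⟩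
  · rintro ⟨c, hmem, hsp⟩
    refine ⟨c, he ▸ hsp, ?_⟩
    rw [PySem.Str.isIn_iff_infix]
    rw [String.toList_ofList]; exact (singleton_infix_iff_mem c p.toList).mpr hmem

-- ===== VERDICT (by name: the statement is the Claim_ definition above) =====
theorem checkSP_spec : Claim_equal_checkSP := by
  intro p _
  unfold Spec_checkSP checkSP
  rw [Bool.eq_iff_iff, checkSPgo_eq_true_iff, checkSP_alt_eq_true_iff]
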